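-- pv_equiv track=rewrite | github.com/alvinchong-sf/algorithms | code_signal/arcade_intro/array_max_consecutive_sum.py | solution
-- ===== SOURCE A (Python) =====
-- def solution(inputArray, k):
--     n = len(inputArray)
--     max_sum = 0
--     curr_sum = 0
--     j = 0
--
--     for i in range(n):
--         curr_sum += inputArray[i]
--
--         while i-j+1 >= k:
--             max_sum = max(max_sum, curr_sum)
--             curr_sum -= inputArray[j]
--             j += 1
--
--     return max_sum
-- ===== SOURCE B (Python) =====
-- def solution(inputArray, k):
--     pre = [0]
--     for x in inputArray:
--         pre.append(pre[-1] + x)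
--     max_sum = 0
--     for i in range(len(inputArray) - k + 1):
--         max_sum = max(max_sum, pre[i + k] - pre[i])
--     return max_sum
-- ===== Notes on version B (the rewrite author's own statement) =====
-- stated objective: alternative
-- what changed: Replaced A's incremental two-pointer running-sum sliding window by a prefix-sum table built once, followed by a separate pass taking window sums as prefix differences pre[i+k]-pre[i].
-- outside the precondition, e.g. on solution([], 0): A returns 0, B returns 0; on solution([], -1): A returns 0, B raises IndexError
-- crash fix: On k = 0 with a nonempty array A raises IndexError (its inner while overruns the array) while B returns 0. — e.g. on solution([1], 0): A raises IndexError, B returns 0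
import Mathlib
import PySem

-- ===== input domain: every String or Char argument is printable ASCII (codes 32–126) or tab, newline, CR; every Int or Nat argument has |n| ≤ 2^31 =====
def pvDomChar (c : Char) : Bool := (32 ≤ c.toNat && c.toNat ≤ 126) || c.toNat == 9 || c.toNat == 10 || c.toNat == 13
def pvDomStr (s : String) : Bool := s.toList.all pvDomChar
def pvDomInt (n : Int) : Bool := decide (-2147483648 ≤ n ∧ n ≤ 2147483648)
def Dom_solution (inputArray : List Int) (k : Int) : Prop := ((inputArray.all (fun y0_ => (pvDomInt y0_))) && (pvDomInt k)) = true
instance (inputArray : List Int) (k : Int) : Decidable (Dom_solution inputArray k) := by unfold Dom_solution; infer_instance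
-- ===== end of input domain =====

-- B replaces A's two-pointer running-sum window by a prefix-sum table plus a
-- window-difference pass (alternative decomposition, same O(n) cost).

-- ===== PORT A =====
-- inner 'while i-j+1 >= k' loop of A; inputArray[j] out of range is an IndexError
-- in Python, excluded by Pre_solution, so pyGetD with default 0 is exact there.
def whileA (arr : List Int) (k i : Int) (ms cs j : Int) : Int × Int × Int :=
  if h : i - j + 1 ≥ k then
    whileA arr k i (max ms cs) (cs - PySem.List.pyGetD arr j 0) (j + 1)
  else (ms, cs, j)
termination_by (i + 2 - k - j).toNat
decreasing_by omega

def solution (inputArray : List Int) (k : Int) : Int :=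
  ((PySem.List.pyRange 0 (inputArray.length : Int) 1).foldl
    (fun st i => whileA inputArray k i st.1 (st.2.1 + PySem.List.pyGetD inputArray i 0) st.2.2)
    (0, 0, 0)).1

-- ===== PORT B =====
def solution_alt (inputArray : List Int) (k : Int) : Int :=
  let pre := inputArray.foldl (fun p x => p ++ [PySem.List.pyGetD p (-1) 0 + x]) [0]
  (PySem.List.pyRange 0 ((inputArray.length : Int) - k + 1) 1).foldl
    (fun m i => max m (PySem.List.pyGetD pre (i + k) 0 - PySem.List.pyGetD pre i 0)) 0

-- ===== PRECONDITION & SPEC =====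
-- Pre_ excludes k ≤ 0: there A raises IndexError on every nonempty array (its inner
-- while overruns the array), and k ≤ 0 is outside the window-size task's natural
-- domain (on the empty array with k ≤ 0 A happens to return 0).
def Pre_solution (inputArray : List Int) (k : Int) : Prop := 1 ≤ k
instance (inputArray : List Int) (k : Int) : Decidable (Pre_solution inputArray k) := by unfold Pre_solution; infer_instance
def pvWitness_solution : List Int × Int := ([1, -2, 3, 4], 2)

-- On k = 0 with a nonempty array A raises IndexError while B returns 0.
def Raises_solution (inputArray : List Int) (k : Int) : Prop := k = 0 ∧ inputArray ≠ []
instance (inputArray : List Int) (k : Int) : Decidable (Raises_solution inputArray k) := by unfold Raises_solution; infer_instance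
def pvRaiseWitness_solution : List Int × Int := ([1], 0)
def pvRaiseWitnessOut_solution : Int := 0

def Spec_solution (inputArray : List Int) (k : Int) (out : Int) : Prop := out = solution_alt inputArray k
instance (inputArray : List Int) (k : Int) (out : Int) : Decidable (Spec_solution inputArray k out) := by unfold Spec_solution; infer_instance

-- ===== CLAIM (what is proved, stated in full; the proofs are below) =====
def Claim_equal_solution : Prop := ∀ (inputArray : List Int) (k : Int), Dom_solution inputArray k → Pre_solution inputArray k → Spec_solution inputArray k (solution inputArray k)
def Claim_raises_solution : Prop := (∀ (inputArray : List Int) (k : Int), Dom_solution inputArray k → Raises_solution inputArray k → ¬ Pre_solution inputArray k) ∧ (Dom_solution (pvRaiseWitness_solution.1) (pvRaiseWitness_solution.2) ∧ Raises_solution (pvRaiseWitness_solution.1) (pvRaiseWitness_solution.2) ∧ solution_alt (pvRaiseWitness_solution.1) (pvRaiseWitness_solution.2) = pvRaiseWitnessOut_solution)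

-- ===== LEMMAS AND PROOFS =====

-- sum of window arr[j .. j+K)
def win (arr : List Int) (K : Nat) (j : Nat) : Int := ((arr.drop j).take K).sum

-- B's prefix list is the table of partial sums
theorem preEq (arr : List Int) :
    arr.foldl (fun p x => p ++ [PySem.List.pyGetD p (-1) 0 + x]) [0]
      = (List.range (arr.length + 1)).map (fun m => (arr.take m).sum) := by
  induction arr using List.reverseRecOn with
  | nil => simp
  | append_singleton ys x ih =>
      rw [List.foldl_append, ih]
      have hr : List.range (ys.length + 1) = List.range ys.length ++ [ys.length] := by
        simp [List.range_succ]
      rw [List.foldl_cons, List.foldl_nil, hr, List.map_append]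
      simp only [List.map_cons, List.map_nil]
      rw [PySem.List.pyGetD_neg_one_append_singleton]
      have h2 : (ys ++ [x]).length + 1 = (ys.length + 1) + 1 := by simp
      rw [h2, List.range_succ, List.map_append, hr, List.map_append]
      congr 1
      · congr 1
        · apply List.map_congr_left
          intro m hm
          simp only [List.mem_range] at hm
          simp [List.take_append_of_le_length (by omega : m ≤ ys.length)]
        · simp [List.take_append_of_le_length (le_refl ys.length)]
      · simp

theorem pyGetD_map_sum (arr : List Int) (i : Int) (h0 : 0 ≤ i) (h1 : i ≤ (arr.length : Int)) :
    PySem.List.pyGetD ((List.range (arr.length + 1)).map (fun m => (arr.take m).sum)) i 0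
      = (arr.take i.toNat).sum := by
  rw [PySem.List.pyGetD_eq_getElem _ _ h0 (by simp; omega)]
  simp

theorem sum_take_sub (arr : List Int) (a b : Nat) :
    (arr.take (a + b)).sum - (arr.take a).sum = win arr b a := by
  rw [List.take_add, List.sum_append, win]; ring

theorem B_eq (arr : List Int) (k : Int) (_hk : 1 ≤ k) :
    solution_alt arr k
      = (PySem.List.pyRange 0 ((arr.length : Int) - k + 1) 1).foldl
          (fun b i => max b (win arr k.toNat i.toNat)) 0 := by
  unfold solution_alt
  rw [preEq]
  apply PySem.List.foldl_congr_mem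
  intro acc i hi
  rw [PySem.List.mem_pyRange_one] at hi
  congr 1
  rw [pyGetD_map_sum arr (i + k) (by omega) (by omega),
      pyGetD_map_sum arr i (by omega) (by omega)]
  have h : (i + k).toNat = i.toNat + k.toNat := by omega
  rw [h, sum_take_sub]

-- one execution of A's inner while loop, given the entry invariant window ≤ k
theorem whileA_step (arr : List Int) (k i ms cs j : Int) (hk : 1 ≤ k) (hle : i - j + 1 ≤ k) :
    whileA arr k i ms cs j
      = if i - j + 1 = k then (max ms cs, cs - PySem.List.pyGetD arr j 0, j + 1)
        else (ms, cs, j) := by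
  by_cases hc : i - j + 1 = k
  · rw [whileA, dif_pos (by omega), whileA, dif_neg (by omega), if_pos hc]
  · rw [whileA, dif_neg (by omega), if_neg hc]

-- invariant of A's outer loop after the first m elements
theorem A_loop (arr : List Int) (k : Int) (hk : 1 ≤ k) :
    ∀ m : Nat, m ≤ arr.length →
    (PySem.List.pyRange 0 (m : Int) 1).foldl
        (fun st i => whileA arr k i st.1 (st.2.1 + PySem.List.pyGetD arr i 0) st.2.2)
        (0, 0, 0)
      = ((PySem.List.pyRange 0 ((m : Int) - k + 1) 1).foldl
            (fun b i => max b (win arr k.toNat i.toNat)) 0,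
         ((arr.take m).drop (((m : Int) + 1 - k).toNat)).sum,
         max 0 ((m : Int) + 1 - k)) := by
  intro m
  induction m with
  | zero =>
      intro _
      rw [PySem.List.pyRange_one_eq_nil (by omega), PySem.List.pyRange_one_eq_nil (by omega)]
      simp
      omega
  | succ m ih =>
      intro hm
      have hmn : m < arr.length := by omega
      have hcast : ((m + 1 : Nat) : Int) = (m : Int) + 1 := by push_cast; ring
      rw [hcast, PySem.List.pyRange_one_succ_right (by omega), List.foldl_append,
          ih (by omega), List.foldl_cons, List.foldl_nil]
      simp only []
      -- the step is whileA at i = m with entry state (B, C + arr[m], J)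
      rw [PySem.List.pyGetD_ofNat arr m 0 hmn]
      by_cases hcase : k ≤ (m : Int) + 1
      · -- full window: the while body runs exactly once
        have hJ : max 0 ((m : Int) + 1 - k) = (m : Int) + 1 - k := by omega
        obtain ⟨jn, hjn⟩ : ∃ j : Nat, ((m : Int) + 1 - k).toNat = j := ⟨_, rfl⟩
        have hjI : ((m : Int) + 1 - k) = (jn : Int) := by omega
        have hjm : jn ≤ m := by omega
        have hK : 1 ≤ k.toNat := by omega
        have hkn : jn + k.toNat = m + 1 := by omega
        rw [hJ, whileA_step arr k m _ _ _ hk (by omega), if_pos (by omega), hjn]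
        have htk : arr.take (m+1) = arr.take m ++ [arr[m]] := by
          rw [List.take_add_one]
          simp [List.getElem?_eq_getElem hmn]
        have h1 : ((arr.take (m+1)).drop jn).sum = ((arr.take m).drop jn).sum + arr[m] := by
          rw [htk, List.drop_append_of_le_length (by simp; omega)]
          simp
        have hCwin : ((arr.take m).drop jn).sum + arr[m] = win arr k.toNat jn := by
          rw [win, ← h1, List.drop_take]
          have hh : m + 1 - jn = k.toNat := by omega
          rw [hh]
        have hjlen : jn < arr.length := by omega
        have hg : PySem.List.pyGetD arr ((m:Int) + 1 - k) 0 = arr[jn] := by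
          rw [hjI, PySem.List.pyGetD_ofNat arr jn 0 hjlen]
        have hT : (PySem.List.pyRange 0 ((m : Int) + 1 - k + 1) 1).foldl
              (fun b i => max b (win arr k.toNat i.toNat)) 0
            = max ((PySem.List.pyRange 0 ((m : Int) - k + 1) 1).foldl
                (fun b i => max b (win arr k.toNat i.toNat)) 0) (win arr k.toNat jn) := by
          have hsplit : ((m:Int)) + 1 - k + 1 = ((m:Int) - k + 1) + 1 := by ring
          rw [hsplit, PySem.List.pyRange_one_succ_right (by omega : (0:Int) ≤ (m:Int) - k + 1),
              List.foldl_append, List.foldl_cons, List.foldl_nil]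
          have hh : ((m:Int) - k + 1).toNat = jn := by omega
          rw [hh]
        rw [hT]
        refine Prod.ext ?_ (Prod.ext ?_ ?_)
        · simp only []
          rw [hCwin]
        · simp only [hg]
          have h2 : ((m:Int) + 1 + 1 - k).toNat = jn + 1 := by omega
          have h3 : jn < (arr.take (m+1)).length := by simp; omega
          have h4 : ((arr.take (m+1)).drop jn).sum = arr[jn] + ((arr.take (m+1)).drop (jn+1)).sum := by
            rw [List.drop_eq_getElem_cons h3, List.sum_cons, List.getElem_take]
          simp only [h2]
          omega
        · simp only []
          omega
      · -- window still smaller than k: while body does not run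
        rw [whileA_step arr k m _ _ _ hk (by omega), if_neg (by omega)]
        have h0 : max 0 ((m:Int) + 1 - k) = 0 := by omega
        have h0' : ((m:Int) + 1 - k).toNat = 0 := by omega
        have h0'' : ((m:Int) + 1 + 1 - k).toNat = 0 := by omega
        rw [PySem.List.pyRange_one_eq_nil (by omega), PySem.List.pyRange_one_eq_nil (by omega)]
        simp only [List.foldl_nil]
        refine Prod.ext ?_ (Prod.ext ?_ ?_)
        · rfl
        · simp only [h0', h0'', List.drop_zero]
          have htk : arr.take (m+1) = arr.take m ++ [arr[m]] := by
            rw [List.take_add_one]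
            simp [List.getElem?_eq_getElem hmn]
          rw [htk, List.sum_append, List.sum_cons, List.sum_nil]
          ring
        · simp; omega

-- ===== VERDICT (by name: the statement is the Claim_ definition above) =====
theorem solution_spec : Claim_equal_solution := by
  intro arr k _ hk
  unfold Spec_solution solution
  rw [A_loop arr k hk arr.length le_rfl, B_eq arr k hk]

theorem solution_raises : Claim_raises_solution := by
  unfold Claim_raises_solution
  exact ⟨fun arr k _ hr => by simp [Raises_solution] at hr; simp [Pre_solution, hr.1], by decide⟩

-- consumed self-check of the raises theorem: B's port really returns 0 at the raise witness
theorem solution_raises_witness_ok :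
    solution_alt pvRaiseWitness_solution.1 pvRaiseWitness_solution.2 = pvRaiseWitnessOut_solution := by
  have h := solution_raises
  unfold Claim_raises_solution at h
  exact h.2.2.2
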